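-- pv_equiv track=rewrite | github.com/huangx-git/ETROC2_CEtest_sw | tamalero/beam_utils.py | read_adr
-- ===== SOURCE A (Python) =====
-- def read_adr(address: str) -> int:
--     tmp_adr = ""
--     for ch in address[::-1]:
--         try:
--             int(ch)
--             tmp_adr += ch
--         except ValueError:
--             break
--     tmp_adr = int(tmp_adr[::-1])
--     return tmp_adr
-- ===== SOURCE B (Python) =====
-- import re
--
-- def read_adr(address: str) -> int:
--     # one regex match for the trailing digit run instead of a reverse-and-accumulate loop;
--     # \d matches the same characters (Unicode category Nd) that int(ch) accepts, and
--     # int("") preserves the ValueError when there is no trailing digit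
--     m = re.search(r'\d+\Z', address)
--     return int(m.group() if m else "")
-- ===== Notes on version B (the rewrite author's own statement) =====
-- stated objective: idiomatic
-- what changed: Replaces the hand-rolled reversed-scan/accumulate/re-reverse loop with a single regex search for the trailing digit run, converted once with int(); converting the empty match preserves the ValueError (A and B both raise) when there is no trailing digit.
-- outside the precondition, e.g. on read_adr(''): A raises ValueError, B raises ValueError
import Mathlib
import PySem

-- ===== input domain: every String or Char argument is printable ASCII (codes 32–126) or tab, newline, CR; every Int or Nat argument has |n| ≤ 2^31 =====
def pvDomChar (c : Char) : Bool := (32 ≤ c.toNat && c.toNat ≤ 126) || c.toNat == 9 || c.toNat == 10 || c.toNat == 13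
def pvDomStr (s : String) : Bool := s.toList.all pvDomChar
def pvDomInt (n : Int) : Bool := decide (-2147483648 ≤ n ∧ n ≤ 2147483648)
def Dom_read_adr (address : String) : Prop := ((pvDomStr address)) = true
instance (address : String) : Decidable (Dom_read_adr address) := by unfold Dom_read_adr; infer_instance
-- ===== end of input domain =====

-- B replaces A's reversed-scan/accumulate/re-reverse loop by one regex search for the
-- trailing digit run (idiomatic; same cost). Equivalence is about the return value.

-- ===== PORT A =====
-- the for-loop over address[::-1]: try int(ch) (ofChars? [ch] = some ↔ no ValueError),
-- append to tmp_adr on success, break on failure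
def readAdrLoop : List Char → List Char → List Char
  | [], tmp => tmp
  | ch :: rest, tmp =>
    if (PySem.Int.ofChars? [ch]).isSome then readAdrLoop rest (tmp ++ [ch]) else tmp

def read_adr (address : String) : Int :=
  -- address[::-1] is the reverse
  let tmp := readAdrLoop address.toList.reverse []
  -- int(tmp_adr[::-1]); Pre_ excludes the ValueError case (empty tmp_adr)
  (PySem.Int.ofChars? tmp.reverse).getD 0

-- ===== PORT B =====
-- re.search(r'\d+\Z', address): the match (if any) is exactly the maximal trailing run
-- of digit characters; on Dom's ASCII strings that digit set is '0'..'9' = Char.isDigit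
-- (in full Python both A's int(ch) test and B's \d are Unicode category Nd, so they
-- agree there too; the theorems cover the ASCII domain). int() of the match once.
def read_adr_alt (address : String) : Int :=
  let m := (address.toList.reverse.takeWhile Char.isDigit).reverse
  (PySem.Int.ofChars? m).getD 0

-- ===== PRECONDITION & SPEC =====
-- Pre_ excludes exactly the inputs (within the ASCII domain Dom_) on which A raises
-- ValueError — the empty string and strings whose last character is not a digit; B
-- raises ValueError on exactly the same inputs (int("") on an empty regex match).
def Pre_read_adr (address : String) : Prop :=
  address.toList.getLast?.any Char.isDigit = true
instance (address : String) : Decidable (Pre_read_adr address) := by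
  unfold Pre_read_adr; infer_instance

def pvWitness_read_adr : String := "node12"

def Spec_read_adr (address : String) (out : Int) : Prop := out = read_adr_alt address
instance (address : String) (out : Int) : Decidable (Spec_read_adr address out) := by
  unfold Spec_read_adr; infer_instance

-- ===== CLAIM (what is proved, stated in full; the proofs are below) =====
def Claim_equal_read_adr : Prop := ∀ (address : String), Dom_read_adr address → Pre_read_adr address → Spec_read_adr address (read_adr address)

-- ===== LEMMAS AND PROOFS =====

-- on domain characters, int(ch) succeeds exactly on the ASCII digits (finite check)
theorem ofChars_single_fin :
    ∀ n : Fin 127, ((PySem.Int.ofChars? [Char.ofNat n]).isSome = (Char.ofNat n).isDigit) := by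
  decide

theorem ofChars_single (c : Char) (hc : pvDomChar c = true) :
    (PySem.Int.ofChars? [c]).isSome = c.isDigit := by
  have hlt : c.toNat < 127 := by
    unfold pvDomChar at hc
    simp only [Bool.or_eq_true, Bool.and_eq_true, decide_eq_true_eq, beq_iff_eq,
      Nat.le_iff_lt_or_eq] at hc
    omega
  have := ofChars_single_fin ⟨c.toNat, hlt⟩
  simpa [Char.ofNat_toNat] using this

-- A's loop is append-of-takeWhile over its success predicate
theorem readAdrLoop_eq (l tmp : List Char) :
    readAdrLoop l tmp = tmp ++ l.takeWhile (fun c => (PySem.Int.ofChars? [c]).isSome) := by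
  induction l generalizing tmp with
  | nil => simp [readAdrLoop]
  | cons c rest ih =>
    by_cases h : (PySem.Int.ofChars? [c]).isSome
    · simp [readAdrLoop, h, ih]
    · simp [readAdrLoop, h]

theorem takeWhile_dom (l : List Char) (hd : ∀ c ∈ l, pvDomChar c = true) :
    l.takeWhile (fun c => (PySem.Int.ofChars? [c]).isSome) = l.takeWhile Char.isDigit := by
  induction l with
  | nil => rfl
  | cons c rest ih =>
    have hc := ofChars_single c (hd c (by simp))
    simp only [List.takeWhile_cons, hc]
    split
    · rw [ih (fun x hx => hd x (by simp [hx]))]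
    · rfl

-- ===== VERDICT (by name: the statement is the Claim_ definition above) =====
theorem read_adr_spec : Claim_equal_read_adr := by
  intro address hdom _hpre
  unfold Spec_read_adr read_adr read_adr_alt
  have hd : ∀ c ∈ address.toList.reverse, pvDomChar c = true := by
    intro c hc
    have : c ∈ address.toList := by simpa using hc
    exact List.all_eq_true.mp hdom c this
  rw [readAdrLoop_eq, takeWhile_dom _ hd]
  simp
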